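-- pv_equiv track=rewrite | github.com/BigBellyKing/My-novels | tr_cerebras.py | check_hallucination
-- ===== SOURCE A (Python) =====
-- def check_hallucination(text):
--     """Checks for repetitive loops."""
--     lines = [line.strip() for line in text.split('\n') if line.strip()]
--     if len(lines) < 10: return False
--
--     # Check for immediate repetition
--     for i in range(len(lines) - 5):
--         chunk = lines[i:i+5]
--         if i + 10 <= len(lines):
--             next_chunk = lines[i+5:i+10]
--             if chunk == next_chunk: return True
--     return False
-- ===== SOURCE B (Python) =====
-- def check_hallucination(text):
--     """Checks for repetitive loops."""
--     lines = [line.strip() for line in text.split('\n') if line.strip()]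
--     n = len(lines)
--     if n < 10:
--         return False
--     # single pass: count the run of consecutive offset-5 line matches;
--     # a run of 5 means a 5-line block is immediately repeated
--     run = 0
--     for j in range(n - 5):
--         run = run + 1 if lines[j] == lines[j + 5] else 0
--         if run >= 5:
--             return True
--     return False
-- ===== Notes on version B (the rewrite author's own statement) =====
-- stated objective: alternative
-- what changed: Replaces the per-index comparison of two 5-element slice copies by a single pass that counts the run of consecutive offset-5 single-line matches and reports once the run reaches 5.
import Mathlib
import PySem

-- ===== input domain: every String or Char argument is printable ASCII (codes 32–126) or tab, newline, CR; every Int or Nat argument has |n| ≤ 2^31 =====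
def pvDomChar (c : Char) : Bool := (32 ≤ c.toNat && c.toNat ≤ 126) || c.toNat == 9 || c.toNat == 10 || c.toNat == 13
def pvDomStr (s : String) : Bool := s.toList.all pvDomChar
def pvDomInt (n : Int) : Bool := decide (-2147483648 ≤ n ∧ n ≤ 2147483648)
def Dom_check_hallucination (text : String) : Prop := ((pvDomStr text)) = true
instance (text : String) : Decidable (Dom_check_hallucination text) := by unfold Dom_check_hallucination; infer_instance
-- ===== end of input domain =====

-- B replaces A's comparison of two 5-element slice copies at every index by a single pass
-- counting the run of consecutive offset-5 single-line matches (alternative decomposition).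

-- lines = [line.strip() for line in text.split('\n') if line.strip()]  (shared first line of both versions)
-- split? with sep = "\n" ≠ "" always returns some, so getD [] is exact
def pvLines (text : String) : List String :=
  (((PySem.Str.split? text "\n").getD []).map PySem.Str.strip).filter (fun l => l ≠ "")

-- ===== PORT A =====
-- for i in range(len(lines)-5): chunk/next_chunk slices, early return on equality
def aLoop (lines : List String) (n : Int) : List Int → Bool
  | [] => false
  | i :: rest =>
    let chunk := PySem.List.slice lines (some i) (some (i + 5))
    if i + 10 ≤ n then
      let next_chunk := PySem.List.slice lines (some (i + 5)) (some (i + 10))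
      if chunk = next_chunk then true else aLoop lines n rest
    else aLoop lines n rest

def check_hallucination (text : String) : Bool :=
  let lines := pvLines text
  let n : Int := lines.length
  if n < 10 then false
  else aLoop lines n (PySem.List.pyRange 0 (n - 5) 1)

-- ===== PORT B =====
-- run-counter pass; lines[j] / lines[j+5] are always in range here, so pyGet? is exact
def bLoop (lines : List String) : Int → List Int → Bool
  | _, [] => false
  | run, j :: rest =>
    let run' := if PySem.List.pyGet? lines j = PySem.List.pyGet? lines (j + 5) then run + 1 else 0
    if 5 ≤ run' then true else bLoop lines run' rest

def check_hallucination_alt (text : String) : Bool :=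
  let lines := pvLines text
  let n : Int := lines.length
  if n < 10 then false
  else bLoop lines 0 (PySem.List.pyRange 0 (n - 5) 1)

-- ===== PRECONDITION & SPEC =====
def Spec_check_hallucination (text : String) (out : Bool) : Prop := out = check_hallucination_alt text
instance (text : String) (out : Bool) : Decidable (Spec_check_hallucination text out) := by unfold Spec_check_hallucination; infer_instance

-- ===== CLAIM (what is proved, stated in full; the proofs are below) =====
def Claim_equal_check_hallucination : Prop := ∀ (text : String), Dom_check_hallucination text → Spec_check_hallucination text (check_hallucination text)

-- ===== LEMMAS AND PROOFS =====

-- single-line offset-5 match at index t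
def pvM (lines : List String) (t : Int) : Prop :=
  PySem.List.pyGet? lines t = PySem.List.pyGet? lines (t + 5)

-- characterization of A's loop: true iff some in-guard window has equal slices
theorem aLoop_iff (lines : List String) (n : Int) :
    ∀ (k : Nat) (i0 : Int), (n - 5 - i0).toNat = k →
    (aLoop lines n (PySem.List.pyRange i0 (n - 5) 1) = true ↔
      ∃ i : Int, i0 ≤ i ∧ i + 10 ≤ n ∧
        PySem.List.slice lines (some i) (some (i + 5)) =
          PySem.List.slice lines (some (i + 5)) (some (i + 10))) := by
  intro k
  induction k with
  | zero =>
    intro i0 hk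
    rw [PySem.List.pyRange_one_eq_nil (by omega)]
    simp only [aLoop]
    constructor
    · intro h; simp at h
    · rintro ⟨i, h1, h2, _⟩; exfalso; omega
  | succ k ih =>
    intro i0 hk
    rw [PySem.List.pyRange_one_cons (show i0 < n - 5 by omega)]
    simp only [aLoop]
    by_cases hg : i0 + 10 ≤ n
    · rw [if_pos hg]
      by_cases heq : PySem.List.slice lines (some i0) (some (i0 + 5)) =
          PySem.List.slice lines (some (i0 + 5)) (some (i0 + 10))
      · rw [if_pos heq]
        exact ⟨fun _ => ⟨i0, le_rfl, hg, heq⟩, fun _ => rfl⟩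
      · rw [if_neg heq, ih (i0 + 1) (by omega)]
        constructor
        · rintro ⟨i, h1, h2, h3⟩; exact ⟨i, by omega, h2, h3⟩
        · rintro ⟨i, h1, h2, h3⟩
          rcases eq_or_lt_of_le h1 with rfl | h
          · exact absurd h3 heq
          · exact ⟨i, by omega, h2, h3⟩
    · rw [if_neg hg, ih (i0 + 1) (by omega)]
      constructor
      · rintro ⟨i, h1, h2, h3⟩; exact ⟨i, by omega, h2, h3⟩
      · rintro ⟨i, h1, h2, h3⟩
        rcases eq_or_lt_of_le h1 with rfl | h
        · exact absurd h2 hg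
        · exact ⟨i, by omega, h2, h3⟩

-- characterization of B's loop with run credit r
theorem bLoop_iff (lines : List String) (e : Int) :
    ∀ (k : Nat) (j0 : Int), (e - j0).toNat = k → ∀ (r : Int), 0 ≤ r →
    (bLoop lines r (PySem.List.pyRange j0 e 1) = true ↔
      ((∃ j : Int, j0 ≤ j ∧ j < e ∧ (∀ t, j0 ≤ t → t ≤ j → pvM lines t) ∧ 5 ≤ r + (j + 1 - j0)) ∨
       (∃ i : Int, j0 ≤ i ∧ i + 5 ≤ e ∧ (∀ t, i ≤ t → t < i + 5 → pvM lines t)))) := by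
  intro k
  induction k with
  | zero =>
    intro j0 hk r hr
    rw [PySem.List.pyRange_one_eq_nil (by omega)]
    simp only [bLoop]
    constructor
    · intro h; simp at h
    · rintro (⟨j, h1, h2, _, _⟩ | ⟨i, h1, h2, _⟩) <;> (exfalso; omega)
  | succ k ih =>
    intro j0 hk r hr
    rw [PySem.List.pyRange_one_cons (show j0 < e by omega)]
    simp only [bLoop]
    by_cases hm : PySem.List.pyGet? lines j0 = PySem.List.pyGet? lines (j0 + 5)
    · rw [if_pos hm]
      by_cases h5 : (5 : Int) ≤ r + 1
      · rw [if_pos h5]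
        constructor
        · intro _
          left
          refine ⟨j0, le_rfl, by omega, ?_, by omega⟩
          intro t ht1 ht2
          have : t = j0 := by omega
          subst this; exact hm
        · intro _; rfl
      · rw [if_neg h5, ih (j0 + 1) (by omega) (r + 1) (by omega)]
        constructor
        · rintro (⟨j, h1, h2, hall, hc⟩ | ⟨i, h1, h2, hall⟩)
          · left
            refine ⟨j, by omega, h2, ?_, by omega⟩
            intro t ht1 ht2
            rcases eq_or_lt_of_le ht1 with rfl | h
            · exact hm
            · exact hall t (by omega) ht2
          · right; exact ⟨i, by omega, h2, hall⟩
        · rintro (⟨j, h1, h2, hall, hc⟩ | ⟨i, h1, h2, hall⟩)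
          · rcases eq_or_lt_of_le h1 with rfl | h
            · exfalso; omega
            · left
              refine ⟨j, by omega, h2, fun t ht1 ht2 => hall t (by omega) ht2, by omega⟩
          · rcases eq_or_lt_of_le h1 with rfl | h
            · left
              refine ⟨j0 + 4, by omega, by omega, ?_, by omega⟩
              intro t ht1 ht2
              exact hall t (by omega) (by omega)
            · right; exact ⟨i, by omega, h2, hall⟩
    · rw [if_neg hm, if_neg (show ¬ (5:Int) ≤ 0 by omega), ih (j0 + 1) (by omega) 0 le_rfl]
      constructor
      · rintro (⟨j, h1, h2, hall, hc⟩ | ⟨i, h1, h2, hall⟩)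
        · right
          refine ⟨j - 4, by omega, by omega, ?_⟩
          intro t ht1 ht2
          exact hall t (by omega) (by omega)
        · right; exact ⟨i, by omega, h2, hall⟩
      · rintro (⟨j, h1, h2, hall, hc⟩ | ⟨i, h1, h2, hall⟩)
        · have hj0 := hall j0 le_rfl (by omega)
          unfold pvM at hj0
          exact absurd hj0 hm
        · rcases eq_or_lt_of_le h1 with rfl | h
          · have hj0 := hall j0 le_rfl (by omega)
            unfold pvM at hj0
            exact absurd hj0 hm
          · right; exact ⟨i, by omega, h2, hall⟩

-- bridge: the two 5-element slices are equal iff the five single-line matches hold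
theorem slice_eq_iff (lines : List String) (i : Int) (h0 : 0 ≤ i)
    (h10 : i + 10 ≤ (lines.length : Int)) :
    (PySem.List.slice lines (some i) (some (i + 5)) =
      PySem.List.slice lines (some (i + 5)) (some (i + 10))) ↔
    (∀ t, i ≤ t → t < i + 5 → pvM lines t) := by
  rw [PySem.List.slice_toNat lines h0 (by omega), PySem.List.slice_toNat lines (show (0:Int) ≤ i + 5 by omega) (by omega)]
  have e1 : (i + 5).toNat = i.toNat + 5 := by omega
  have e2 : (i + 10).toNat = i.toNat + 10 := by omega
  rw [e1, e2]
  have e3 : i.toNat + 5 - i.toNat = 5 := by omega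
  have e4 : i.toNat + 10 - (i.toNat + 5) = 5 := by omega
  rw [e3, e4]
  have hlen : i.toNat + 10 ≤ lines.length := by omega
  have hM : ∀ t : Int, i ≤ t → t < i + 5 →
      (pvM lines t ↔ lines[t.toNat]? = lines[t.toNat + 5]?) := by
    intro t ht1 ht2
    unfold pvM
    rw [PySem.List.pyGet?_of_nonneg lines (show (0:Int) ≤ t by omega), PySem.List.pyGet?_of_nonneg lines (show (0:Int) ≤ t + 5 by omega)]
    have : (t + 5).toNat = t.toNat + 5 := by omega
    rw [this]
  constructor
  · intro hsl t ht1 ht2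
    rw [hM t ht1 ht2]
    have hk : (t.toNat - i.toNat) < 5 := by omega
    have := congrArg (fun l => l[t.toNat - i.toNat]?) hsl
    simp only [List.getElem?_take, List.getElem?_drop, hk, if_true] at this
    have ea : i.toNat + (t.toNat - i.toNat) = t.toNat := by omega
    have eb : i.toNat + 5 + (t.toNat - i.toNat) = t.toNat + 5 := by omega
    rw [ea, eb] at this
    exact this
  · intro hall
    apply List.ext_getElem?
    intro k
    by_cases hk : k < 5
    · simp only [List.getElem?_take, List.getElem?_drop, hk, if_true]
      have := (hM (i + k) (by omega) (by omega)).mp (hall (i + k) (by omega) (by omega))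
      have ea : (i + (k : Int)).toNat = i.toNat + k := by omega
      rw [ea] at this
      have eb : i.toNat + k + 5 = i.toNat + 5 + k := by omega
      rw [eb] at this
      exact this
    · have l1 : ((lines.drop i.toNat).take 5).length ≤ 5 := by
        simp [List.length_take]
      have l2 : ((lines.drop (i.toNat + 5)).take 5).length ≤ 5 := by
        simp [List.length_take]
      rw [List.getElem?_eq_none (by omega), List.getElem?_eq_none (by omega)]

-- ===== VERDICT (by name: the statement is the Claim_ definition above) =====
theorem check_hallucination_spec : Claim_equal_check_hallucination := by
  intro text _
  unfold Spec_check_hallucination check_hallucination check_hallucination_alt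
  set lines := pvLines text with hl
  simp only
  by_cases h10 : (lines.length : Int) < 10
  · simp [h10]
  · rw [if_neg h10, if_neg h10, Bool.eq_iff_iff,
        aLoop_iff lines (lines.length : Int) ((lines.length : Int) - 5 - 0).toNat 0 rfl,
        bLoop_iff lines ((lines.length : Int) - 5) ((lines.length : Int) - 5 - 0).toNat 0 rfl 0 le_rfl]
    constructor
    · rintro ⟨i, hi0, hi10, hsl⟩
      right
      exact ⟨i, hi0, by omega, (slice_eq_iff lines i hi0 hi10).mp hsl⟩
    · rintro (⟨j, hj0, hje, hall, hr⟩ | ⟨i, hi0, hi5, hall⟩)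
      · refine ⟨j - 4, by omega, by omega, (slice_eq_iff lines (j - 4) (by omega) (by omega)).mpr ?_⟩
        intro t ht1 ht2
        exact hall t (by omega) (by omega)
      · exact ⟨i, hi0, by omega, (slice_eq_iff lines i hi0 (by omega)).mpr hall⟩
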